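-- pv_equiv track=rewrite | github.com/uxmal/reko | src/Installers/NuGetPackage/update_packagers.py | expand_vars
-- ===== SOURCE A (Python) =====
-- def expand_vars(vars):
--     result = {}
--     for k,v in vars.items():
--         v = v.replace('$TargetDir$', 'bin/$Configuration$/net5.0')
--         v = v.replace('$TargetFwkDir$', 'bin/$Configuration$/net5.0')
--         v = v.replace('$TargetFwk472Dir$', 'bin/$Configuration$/net5.0')
--         v = v.replace('$TargetDir_x64$', 'bin/x64/$Configuration$/net5.0')
--         result[k] = v
--     return result
-- ===== SOURCE B (Python) =====
-- import re
--
-- _MAP = {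
--     '$TargetDir$': 'bin/$Configuration$/net5.0',
--     '$TargetFwkDir$': 'bin/$Configuration$/net5.0',
--     '$TargetFwk472Dir$': 'bin/$Configuration$/net5.0',
--     '$TargetDir_x64$': 'bin/x64/$Configuration$/net5.0',
-- }
-- _PAT = re.compile('|'.join(map(re.escape, _MAP)))
--
--
-- def expand_vars(env):
--     return {k: _PAT.sub(lambda m: _MAP[m.group(0)], v) for k, v in env.items()}
-- ===== Notes on version B (the rewrite author's own statement) =====
-- stated objective: idiomatic
-- what changed: Replaces four sequential full-string str.replace passes by one compiled regex alternation over a placeholder table, expanding every value in a single left-to-right scan.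
import Mathlib
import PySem

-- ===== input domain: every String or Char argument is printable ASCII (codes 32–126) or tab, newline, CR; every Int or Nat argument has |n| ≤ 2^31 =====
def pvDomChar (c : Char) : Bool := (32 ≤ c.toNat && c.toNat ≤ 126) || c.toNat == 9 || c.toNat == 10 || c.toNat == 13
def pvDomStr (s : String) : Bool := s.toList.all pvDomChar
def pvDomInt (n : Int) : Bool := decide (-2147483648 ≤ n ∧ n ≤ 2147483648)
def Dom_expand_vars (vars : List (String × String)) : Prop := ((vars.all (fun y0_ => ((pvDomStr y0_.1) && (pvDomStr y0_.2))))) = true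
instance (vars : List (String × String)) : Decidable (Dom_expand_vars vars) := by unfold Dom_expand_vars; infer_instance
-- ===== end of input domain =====

-- B replaces A's four sequential str.replace passes by ONE left-to-right scan over a
-- placeholder table (a compiled regex alternation in Source B); return values proved equal on Pre_.

-- ===== PORT A =====
def expand_vars (vars : List (String × String)) : List (String × String) :=
  ((PySem.Dict.ofList vars).items.foldl
    (fun result p =>
      let v1 := PySem.Str.replace p.2 "$TargetDir$" "bin/$Configuration$/net5.0"
      let v2 := PySem.Str.replace v1 "$TargetFwkDir$" "bin/$Configuration$/net5.0"
      let v3 := PySem.Str.replace v2 "$TargetFwk472Dir$" "bin/$Configuration$/net5.0"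
      let v4 := PySem.Str.replace v3 "$TargetDir_x64$" "bin/x64/$Configuration$/net5.0"
      result.insert p.1 v4)
    PySem.Dict.empty).items

-- ===== PORT B =====
-- the placeholder table of Source B (_MAP keys in order, and the two expansion strings)
def pvK1 : List Char := "$TargetDir$".toList
def pvK2 : List Char := "$TargetFwkDir$".toList
def pvK3 : List Char := "$TargetFwk472Dir$".toList
def pvK4 : List Char := "$TargetDir_x64$".toList
def pvR1 : List Char := "bin/$Configuration$/net5.0".toList
def pvR2 : List Char := "bin/x64/$Configuration$/net5.0".toList

-- _PAT.sub(lambda m: _MAP[m.group(0)], v): one leftmost non-overlapping scan, trying the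
-- table's alternatives at each position (at most one can match); ported by hand, exact.
def pySub : List Char → List Char
  | [] => []
  | c :: t =>
    if pvK1.isPrefixOf (c :: t) then pvR1 ++ pySub (t.drop 10)
    else if pvK2.isPrefixOf (c :: t) then pvR1 ++ pySub (t.drop 13)
    else if pvK3.isPrefixOf (c :: t) then pvR1 ++ pySub (t.drop 16)
    else if pvK4.isPrefixOf (c :: t) then pvR2 ++ pySub (t.drop 14)
    else c :: pySub t
termination_by s => s.length
decreasing_by all_goals (simp only [List.length_drop, List.length_cons]; omega)

def expand_vars_alt (vars : List (String × String)) : List (String × String) :=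
  (PySem.Dict.ofList vars).items.map (fun p => (p.1, String.ofList (pySub p.2.toList)))

-- ===== PRECONDITION & SPEC =====
-- the six "overlap patterns": a placeholder that A replaces in a LATER pass, with the
-- placeholder of an EARLIER pass starting at its final '$'
def pvForb : List (List Char) :=
  [pvK2.dropLast ++ pvK1, pvK3.dropLast ++ pvK1, pvK4.dropLast ++ pvK1,
   pvK3.dropLast ++ pvK2, pvK4.dropLast ++ pvK2, pvK4.dropLast ++ pvK3]

-- Pre_ excludes values containing overlapping placeholder occurrences (one placeholder's
-- trailing '$' starting an earlier-pass placeholder), where the result A returns is an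
-- accidental artefact of its pass order and B's single leftmost scan is equally defensible.
def Pre_expand_vars (vars : List (String × String)) : Prop :=
  ∀ p ∈ vars, ∀ f ∈ pvForb, ¬ f <:+: p.2.toList
instance (vars : List (String × String)) : Decidable (Pre_expand_vars vars) := by
  unfold Pre_expand_vars; infer_instance

def pvWitness_expand_vars : (List (String × String)) :=
  [("OutputDir", "$TargetDir$/Reko"), ("Lib64", "$TargetDir_x64$ and $TargetFwk472Dir$")]

def Spec_expand_vars (vars : List (String × String)) (out : List (String × String)) : Prop := out = expand_vars_alt vars
instance (vars : List (String × String)) (out : List (String × String)) : Decidable (Spec_expand_vars vars out) := by unfold Spec_expand_vars; infer_instance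

-- ===== CLAIM (what is proved, stated in full; the proofs are below) =====
def Claim_equal_expand_vars : Prop := ∀ (vars : List (String × String)), Dom_expand_vars vars → Pre_expand_vars vars → Spec_expand_vars vars (expand_vars vars)

-- ===== LEMMAS AND PROOFS =====

-- a string is "good" if it contains none of the six overlap patterns
def pvGood (s : List Char) : Prop := ∀ f ∈ pvForb, ¬ f <:+: s

-- clean fuel-free recursion equivalent to PySem.Chars.replace (Python str.replace, old ≠ '')
def rep (k r : List Char) : List Char → List Char
  | [] => []
  | c :: t => if k.isPrefixOf (c :: t) then r ++ rep k r (t.drop (k.length - 1)) else c :: rep k r t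
termination_by s => s.length
decreasing_by all_goals (simp only [List.length_drop, List.length_cons]; omega)

theorem rep_nil (k r : List Char) : rep k r [] = [] := by simp [rep]

theorem drop_length_cons (k : List Char) (hk : k ≠ []) (c : Char) (t : List Char) :
    List.drop k.length (c :: t) = List.drop (k.length - 1) t := by
  cases k with
  | nil => exact absurd rfl hk
  | cons a k' => simp

theorem go_eq_rep (k r : List Char) (hk : k ≠ []) :
    ∀ (fuel : Nat) (l acc : List Char), l.length ≤ fuel →
      PySem.Chars.replace.go k r fuel l acc = acc.reverse ++ rep k r l := by
  intro fuel
  induction fuel with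
  | zero =>
    intro l acc h
    have hl : l = [] := by cases l <;> simp_all
    subst hl
    simp [PySem.Chars.replace.go, rep_nil]
  | succ m ih =>
    intro l acc h
    cases l with
    | nil => simp [PySem.Chars.replace.go, rep_nil]
    | cons c t =>
      rw [PySem.Chars.replace.go]
      by_cases hp : k.isPrefixOf (c :: t)
      · simp only [hp, if_true]
        have hk1 : 1 ≤ k.length := List.length_pos_of_ne_nil hk
        have hlen : (List.drop k.length (c :: t)).length ≤ m := by
          simp only [List.length_drop, List.length_cons] at *
          omega
        rw [ih _ _ hlen, List.reverse_append, List.reverse_reverse]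
        show acc.reverse ++ r ++ rep k r (List.drop k.length (c :: t)) = acc.reverse ++ rep k r (c :: t)
        rw [drop_length_cons k hk]
        conv_rhs => rw [rep]
        simp [hp]
      · simp only [hp]
        have hlen : t.length ≤ m := by simp at h; omega
        rw [ih _ _ hlen]
        conv_rhs => rw [rep]
        simp [hp]

theorem replace_eq_rep (k r s : List Char) (hk : k ≠ []) :
    PySem.Chars.replace s k r = rep k r s := by
  rw [PySem.Chars.replace]
  have : k.isEmpty = false := by cases k with
    | nil => exact absurd rfl hk
    | cons a k' => rfl
  rw [this]
  simp only [Bool.false_eq_true, if_false]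
  exact go_eq_rep k r hk s.length s [] le_rfl

theorem rep_match (k r l : List Char) (hk : k ≠ []) (h : k <+: l) :
    rep k r l = r ++ rep k r (l.drop k.length) := by
  cases l with
  | nil =>
    have : k = [] := List.prefix_nil.mp h
    exact absurd this hk
  | cons c t =>
    rw [rep]
    have hp : k.isPrefixOf (c :: t) = true := List.isPrefixOf_iff_prefix.mpr h
    rw [hp, if_pos rfl, drop_length_cons k hk]

theorem rep_nomatch (k r : List Char) (c : Char) (t : List Char) (h : ¬ k <+: (c :: t)) :
    rep k r (c :: t) = c :: rep k r t := by
  rw [rep]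
  have hp : k.isPrefixOf (c :: t) = false := by
    by_contra hc
    exact h (List.isPrefixOf_iff_prefix.mp (by simpa using hc))
  rw [hp]
  simp

-- "v diverges from u only at a position where v has a 'b'"
def pvDiv (u v : List Char) : Prop :=
  v = u ∨ ∃ j, v.take j = u.take j ∧ v[j]? = some 'b'

theorem pvDiv_refl (u : List Char) : pvDiv u u := Or.inl rfl

theorem pvDiv_cons (c : Char) (t v : List Char) (h : pvDiv t v) : pvDiv (c :: t) (c :: v) := by
  rcases h with rfl | ⟨j, ht, hj⟩
  · exact Or.inl rfl
  · refine Or.inr ⟨j + 1, ?_, ?_⟩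
    · simp [List.take_succ_cons, ht]
    · simpa using hj

theorem pvDiv_comp (u v w : List Char) (h1 : pvDiv u v) (h2 : pvDiv v w) : pvDiv u w := by
  rcases h1 with rfl | ⟨j1, ht1, hj1⟩
  · exact h2
  · rcases h2 with rfl | ⟨j2, ht2, hj2⟩
    · exact Or.inr ⟨j1, ht1, hj1⟩
    · by_cases hle : j2 ≤ j1
      · refine Or.inr ⟨j2, ?_, hj2⟩
        have h'' : v.take j2 = u.take j2 := by
          have := congrArg (List.take j2) ht1
          simpa [List.take_take, Nat.min_eq_left hle] using this
        exact ht2.trans h''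
      · push Not at hle
        refine Or.inr ⟨j1, ?_, ?_⟩
        · have h1' : w.take j1 = v.take j1 := by
            have := congrArg (List.take j1) ht2
            simpa [List.take_take, Nat.min_eq_left (Nat.le_of_lt hle)] using this
          exact h1'.trans ht1
        · have h' : w[j1]? = v[j1]? := by
            have := congrArg (fun l => l[j1]?) ht2
            simpa [List.getElem?_take, hle] using this
          rw [h']
          exact hj1

theorem pvDiv_rep (k r : List Char) (hr : r[0]? = some 'b') :
    ∀ s, pvDiv s (rep k r s) := by
  intro s
  induction s with
  | nil => rw [rep_nil]; exact Or.inl rfl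
  | cons c t ih =>
    rw [rep]
    by_cases hp : k.isPrefixOf (c :: t)
    · simp only [hp, if_true]
      refine Or.inr ⟨0, by simp, ?_⟩
      have hr0 : 0 < r.length := by
        cases r with
        | nil => simp at hr
        | cons a r' => simp
      rw [List.getElem?_append_left hr0]
      exact hr
    · simp only [hp, Bool.false_eq_true, if_false]
      exact pvDiv_cons c t _ ih

theorem head_transfer (k' : List Char) (hb : 'b' ∉ k') (c : Char) (t v : List Char)
    (hn : ¬ k' <+: (c :: t)) (hd : pvDiv t v) : ¬ k' <+: (c :: v) := by
  intro h
  cases k' with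
  | nil => exact hn (List.nil_prefix)
  | cons a k'' =>
    rw [List.cons_prefix_cons] at h
    obtain ⟨rfl, hkv⟩ := h
    have hkt : ¬ k'' <+: t := fun hc => hn (List.cons_prefix_cons.mpr ⟨rfl, hc⟩)
    rcases hd with rfl | ⟨j, htake, hj⟩
    · exact hkt hkv
    · have hkeq : k'' = v.take k''.length := List.prefix_iff_eq_take.mp hkv
      by_cases hjm : j < k''.length
      · have : k''[j]? = v[j]? := by
          rw [hkeq]; simp [hjm]
        rw [hj] at this
        exact hb (List.mem_cons.mpr (Or.inr (List.mem_of_getElem? this)))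
      · push Not at hjm
        have hvt : v.take k''.length = t.take k''.length := by
          have : (v.take j).take k''.length = (t.take j).take k''.length := by rw [htake]
          simpa [List.take_take, Nat.min_eq_left hjm] using this
        exact hkt (List.prefix_iff_eq_take.mpr (hkeq.trans hvt))

theorem rep_copy (k r : List Char) :
    ∀ (n : Nat) (s : List Char), (∀ j < n, ¬ k <+: s.drop j) →
      rep k r s = s.take n ++ rep k r (s.drop n) := by
  intro n
  induction n with
  | zero => intro s _; simp
  | succ m ih =>
    intro s h
    cases s with
    | nil => simp
    | cons c t =>
      have h0 : ¬ k <+: (c :: t) := by simpa using h 0 (Nat.succ_pos m)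
      rw [rep_nomatch k r c t h0]
      rw [ih t (fun j hj => by simpa using h (j + 1) (by omega))]
      simp

theorem rep_barrier (k r : List Char) :
    ∀ (r0 Y : List Char), (∀ j < r0.length, ¬ (r0.drop j <+: k) ∧ ¬ (k <+: r0.drop j)) →
      rep k r (r0 ++ Y) = r0 ++ rep k r Y := by
  intro r0
  induction r0 with
  | nil => intro Y _; simp
  | cons c rs ih =>
    intro Y h
    have h0 := h 0 (by simp)
    simp only [List.drop_zero] at h0
    have hnm : ¬ k <+: (c :: rs) ++ Y := by
      intro hc
      rcases List.prefix_or_prefix_of_prefix hc (List.prefix_append (c :: rs) Y) with h' | h'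
      · exact h0.2 h'
      · exact h0.1 h'
    rw [List.cons_append, rep_nomatch k r c (rs ++ Y) (by simpa using hnm)]
    rw [ih Y (fun j hj => by simpa using h (j + 1) (by simpa using Nat.succ_lt_succ hj))]
    simp

theorem copy_hyps (kA kB V X : List Char) (hA : kA ≠ [])
    (hint : ∀ j < kA.length - 1, ¬ (kA.drop j <+: kB) ∧ ¬ (kB <+: kA.drop j))
    (hforb : ¬ (kA.dropLast ++ kB) <:+: (kA ++ X))
    (hb : 'b' ∉ kB) (hDiv : pvDiv X V) :
    ∀ j < kA.length, ¬ kB <+: (kA ++ V).drop j := by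
  intro j hj
  rw [List.drop_append_of_le_length (Nat.le_of_lt hj)]
  by_cases hjlast : j < kA.length - 1
  · intro hc
    rcases List.prefix_or_prefix_of_prefix hc (List.prefix_append (kA.drop j) V) with h' | h'
    · exact (hint j hjlast).2 h'
    · exact (hint j hjlast).1 h'
  · have hje : j = kA.length - 1 := by omega
    subst hje
    rw [List.drop_length_sub_one hA]
    apply head_transfer kB hb (kA.getLast hA) X V _ hDiv
    intro hc
    apply hforb
    apply List.IsPrefix.isInfix
    obtain ⟨w, hw⟩ := hc
    have h1 : kA.dropLast ++ kB <+: kA.dropLast ++ (kA.getLast hA :: X) := by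
      refine ⟨w, ?_⟩
      rw [List.append_assoc, hw]
    rwa [List.append_cons, List.dropLast_append_getLast hA] at h1

theorem rep_copy_block (kA kB r V X : List Char) (hA : kA ≠ [])
    (hint : ∀ j < kA.length - 1, ¬ (kA.drop j <+: kB) ∧ ¬ (kB <+: kA.drop j))
    (hforb : ¬ (kA.dropLast ++ kB) <:+: (kA ++ X))
    (hb : 'b' ∉ kB) (hDiv : pvDiv X V) :
    rep kB r (kA ++ V) = kA ++ rep kB r V := by
  rw [rep_copy kB r kA.length (kA ++ V) (copy_hyps kA kB V X hA hint hforb hb hDiv)]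
  rw [List.take_left, List.drop_left]

theorem pvGood_of_infix (s t : List Char) (h : t <:+: s) (hg : pvGood s) : pvGood t := by
  intro f hf hi; exact hg f hf (hi.trans h)

theorem hK1b : 'b' ∉ pvK1 := by decide
theorem hK2b : 'b' ∉ pvK2 := by decide
theorem hK3b : 'b' ∉ pvK3 := by decide
theorem hK4b : 'b' ∉ pvK4 := by decide
theorem hR1b : pvR1[0]? = some 'b' := by decide

theorem hint21 : ∀ j < pvK2.length - 1, ¬ (pvK2.drop j <+: pvK1) ∧ ¬ (pvK1 <+: pvK2.drop j) := by decide
theorem hint31 : ∀ j < pvK3.length - 1, ¬ (pvK3.drop j <+: pvK1) ∧ ¬ (pvK1 <+: pvK3.drop j) := by decide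
theorem hint32 : ∀ j < pvK3.length - 1, ¬ (pvK3.drop j <+: pvK2) ∧ ¬ (pvK2 <+: pvK3.drop j) := by decide
theorem hint41 : ∀ j < pvK4.length - 1, ¬ (pvK4.drop j <+: pvK1) ∧ ¬ (pvK1 <+: pvK4.drop j) := by decide
theorem hint42 : ∀ j < pvK4.length - 1, ¬ (pvK4.drop j <+: pvK2) ∧ ¬ (pvK2 <+: pvK4.drop j) := by decide
theorem hint43 : ∀ j < pvK4.length - 1, ¬ (pvK4.drop j <+: pvK3) ∧ ¬ (pvK3 <+: pvK4.drop j) := by decide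

theorem barrier_R1_K2 : ∀ j < pvR1.length, ¬ (pvR1.drop j <+: pvK2) ∧ ¬ (pvK2 <+: pvR1.drop j) := by decide
theorem barrier_R1_K3 : ∀ j < pvR1.length, ¬ (pvR1.drop j <+: pvK3) ∧ ¬ (pvK3 <+: pvR1.drop j) := by decide
theorem barrier_R1_K4 : ∀ j < pvR1.length, ¬ (pvR1.drop j <+: pvK4) ∧ ¬ (pvK4 <+: pvR1.drop j) := by decide

theorem pySub_nil : pySub [] = [] := by simp [pySub]

theorem isPrefixOf_false (k : List Char) (l : List Char) (h : ¬ k <+: l) :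
    k.isPrefixOf l = false := by
  by_contra hc
  exact h (List.isPrefixOf_iff_prefix.mp (by simpa using hc))

theorem pySub_match1 (s : List Char) (h : pvK1 <+: s) :
    pySub s = pvR1 ++ pySub (s.drop pvK1.length) := by
  cases s with
  | nil => exact absurd (List.prefix_nil.mp h) (by decide)
  | cons c t =>
    have hp : pvK1.isPrefixOf (c :: t) = true := List.isPrefixOf_iff_prefix.mpr h
    have hd : List.drop pvK1.length (c :: t) = t.drop 10 := by
      rw [drop_length_cons pvK1 (by decide) c t, show pvK1.length - 1 = 10 from by decide]
    rw [pySub]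
    simp [hp, hd]

theorem pySub_match2 (s : List Char) (h1 : ¬ pvK1 <+: s) (h : pvK2 <+: s) :
    pySub s = pvR1 ++ pySub (s.drop pvK2.length) := by
  cases s with
  | nil => exact absurd (List.prefix_nil.mp h) (by decide)
  | cons c t =>
    have hp1 := isPrefixOf_false pvK1 (c :: t) h1
    have hp : pvK2.isPrefixOf (c :: t) = true := List.isPrefixOf_iff_prefix.mpr h
    have hd : List.drop pvK2.length (c :: t) = t.drop 13 := by
      rw [drop_length_cons pvK2 (by decide) c t, show pvK2.length - 1 = 13 from by decide]
    rw [pySub]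
    simp [hp1, hp, hd]

theorem pySub_match3 (s : List Char) (h1 : ¬ pvK1 <+: s) (h2 : ¬ pvK2 <+: s) (h : pvK3 <+: s) :
    pySub s = pvR1 ++ pySub (s.drop pvK3.length) := by
  cases s with
  | nil => exact absurd (List.prefix_nil.mp h) (by decide)
  | cons c t =>
    have hp1 := isPrefixOf_false pvK1 (c :: t) h1
    have hp2 := isPrefixOf_false pvK2 (c :: t) h2
    have hp : pvK3.isPrefixOf (c :: t) = true := List.isPrefixOf_iff_prefix.mpr h
    have hd : List.drop pvK3.length (c :: t) = t.drop 16 := by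
      rw [drop_length_cons pvK3 (by decide) c t, show pvK3.length - 1 = 16 from by decide]
    rw [pySub]
    simp [hp1, hp2, hp, hd]

theorem pySub_match4 (s : List Char) (h1 : ¬ pvK1 <+: s) (h2 : ¬ pvK2 <+: s) (h3 : ¬ pvK3 <+: s)
    (h : pvK4 <+: s) : pySub s = pvR2 ++ pySub (s.drop pvK4.length) := by
  cases s with
  | nil => exact absurd (List.prefix_nil.mp h) (by decide)
  | cons c t =>
    have hp1 := isPrefixOf_false pvK1 (c :: t) h1
    have hp2 := isPrefixOf_false pvK2 (c :: t) h2
    have hp3 := isPrefixOf_false pvK3 (c :: t) h3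
    have hp : pvK4.isPrefixOf (c :: t) = true := List.isPrefixOf_iff_prefix.mpr h
    have hd : List.drop pvK4.length (c :: t) = t.drop 14 := by
      rw [drop_length_cons pvK4 (by decide) c t, show pvK4.length - 1 = 14 from by decide]
    rw [pySub]
    simp [hp1, hp2, hp3, hp, hd]

theorem pySub_nomatch (c : Char) (t : List Char) (h1 : ¬ pvK1 <+: (c :: t)) (h2 : ¬ pvK2 <+: (c :: t))
    (h3 : ¬ pvK3 <+: (c :: t)) (h4 : ¬ pvK4 <+: (c :: t)) : pySub (c :: t) = c :: pySub t := by
  have hp1 := isPrefixOf_false pvK1 (c :: t) h1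
  have hp2 := isPrefixOf_false pvK2 (c :: t) h2
  have hp3 := isPrefixOf_false pvK3 (c :: t) h3
  have hp4 := isPrefixOf_false pvK4 (c :: t) h4
  rw [pySub]
  simp [hp1, hp2, hp3, hp4]

theorem main_lemma : ∀ (n : Nat) (s : List Char), s.length ≤ n → pvGood s →
    rep pvK4 pvR2 (rep pvK3 pvR1 (rep pvK2 pvR1 (rep pvK1 pvR1 s))) = pySub s := by
  intro n
  induction n with
  | zero =>
    intro s h _
    have : s = [] := by cases s <;> simp_all
    subst this
    simp [rep_nil, pySub_nil]
  | succ m ih =>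
    intro s hlen hg
    have hgdrop : ∀ k, pvGood (s.drop k) := fun k => pvGood_of_infix s _ (List.drop_suffix k s).isInfix hg
    by_cases h1 : pvK1 <+: s
    · -- pass 1 fires here; the other passes walk over the inert expansion pvR1
      rw [rep_match pvK1 pvR1 s (by decide) h1,
          rep_barrier pvK2 pvR1 pvR1 _ barrier_R1_K2,
          rep_barrier pvK3 pvR1 pvR1 _ barrier_R1_K3,
          rep_barrier pvK4 pvR2 pvR1 _ barrier_R1_K4,
          ih _ (by have h' := h1.length_le
                   have h11 : pvK1.length = 11 := by decide
                   simp at h' ⊢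
                   omega) (hgdrop _),
          pySub_match1 s h1]
    · by_cases h2 : pvK2 <+: s
      · obtain ⟨X, hX⟩ := h2
        subst hX
        rw [rep_copy_block pvK2 pvK1 pvR1 X X (by decide) hint21
              (hg _ (by simp [pvForb])) hK1b (pvDiv_refl X),
            rep_match pvK2 pvR1 _ (by decide) (List.prefix_append pvK2 _),
            List.drop_left,
            rep_barrier pvK3 pvR1 pvR1 _ barrier_R1_K3,
            rep_barrier pvK4 pvR2 pvR1 _ barrier_R1_K4,
            ih X (by have hl : pvK2.length = 14 := by decide
                     simp at hlen; omega)
              (pvGood_of_infix _ X (List.suffix_append pvK2 X).isInfix hg),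
            pySub_match2 _ h1 (List.prefix_append pvK2 X), List.drop_left]
      · by_cases h3 : pvK3 <+: s
        · obtain ⟨X, hX⟩ := h3
          subst hX
          rw [rep_copy_block pvK3 pvK1 pvR1 X X (by decide) hint31
                (hg _ (by simp [pvForb])) hK1b (pvDiv_refl X),
              rep_copy_block pvK3 pvK2 pvR1 (rep pvK1 pvR1 X) X (by decide) hint32
                (hg _ (by simp [pvForb])) hK2b (pvDiv_rep pvK1 pvR1 hR1b X),
              rep_match pvK3 pvR1 _ (by decide) (List.prefix_append pvK3 _),
              List.drop_left,
              rep_barrier pvK4 pvR2 pvR1 _ barrier_R1_K4,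
              ih X (by have hl : pvK3.length = 17 := by decide
                       simp at hlen; omega)
                (pvGood_of_infix _ X (List.suffix_append pvK3 X).isInfix hg),
              pySub_match3 _ h1 h2 (List.prefix_append pvK3 X), List.drop_left]
        · by_cases h4 : pvK4 <+: s
          · obtain ⟨X, hX⟩ := h4
            subst hX
            rw [rep_copy_block pvK4 pvK1 pvR1 X X (by decide) hint41
                  (hg _ (by simp [pvForb])) hK1b (pvDiv_refl X),
                rep_copy_block pvK4 pvK2 pvR1 (rep pvK1 pvR1 X) X (by decide) hint42
                  (hg _ (by simp [pvForb])) hK2b (pvDiv_rep pvK1 pvR1 hR1b X),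
                rep_copy_block pvK4 pvK3 pvR1 (rep pvK2 pvR1 (rep pvK1 pvR1 X)) X (by decide) hint43
                  (hg _ (by simp [pvForb])) hK3b
                  (pvDiv_comp X _ _ (pvDiv_rep pvK1 pvR1 hR1b X)
                    (pvDiv_rep pvK2 pvR1 hR1b (rep pvK1 pvR1 X))),
                rep_match pvK4 pvR2 _ (by decide) (List.prefix_append pvK4 _),
                List.drop_left,
                ih X (by have hl : pvK4.length = 15 := by decide
                         simp at hlen; omega)
                  (pvGood_of_infix _ X (List.suffix_append pvK4 X).isInfix hg),
                pySub_match4 _ h1 h2 h3 (List.prefix_append pvK4 X), List.drop_left]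
          · -- no placeholder starts here: every pass copies the head character
            cases s with
            | nil => simp [rep_nil, pySub_nil]
            | cons c t =>
              have hd1 : pvDiv t (rep pvK1 pvR1 t) := pvDiv_rep pvK1 pvR1 hR1b t
              have hd2 : pvDiv t (rep pvK2 pvR1 (rep pvK1 pvR1 t)) :=
                pvDiv_comp t _ _ hd1 (pvDiv_rep pvK2 pvR1 hR1b _)
              have hd3 : pvDiv t (rep pvK3 pvR1 (rep pvK2 pvR1 (rep pvK1 pvR1 t))) :=
                pvDiv_comp t _ _ hd2 (pvDiv_rep pvK3 pvR1 hR1b _)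
              rw [rep_nomatch pvK1 pvR1 c t h1,
                  rep_nomatch pvK2 pvR1 c _ (head_transfer pvK2 hK2b c t _ h2 hd1),
                  rep_nomatch pvK3 pvR1 c _ (head_transfer pvK3 hK3b c t _ h3 hd2),
                  rep_nomatch pvK4 pvR2 c _ (head_transfer pvK4 hK4b c t _ h4 hd3),
                  ih t (by simp at hlen; omega)
                    (pvGood_of_infix _ t (List.suffix_cons c t).isInfix hg),
                  pySub_nomatch c t h1 h2 h3 h4]

theorem value_eq (s : List Char) (hg : pvGood s) :
    PySem.Chars.replace (PySem.Chars.replace (PySem.Chars.replace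
      (PySem.Chars.replace s pvK1 pvR1) pvK2 pvR1) pvK3 pvR1) pvK4 pvR2 = pySub s := by
  rw [replace_eq_rep _ _ _ (by decide), replace_eq_rep _ _ _ (by decide),
      replace_eq_rep _ _ _ (by decide), replace_eq_rep _ _ _ (by decide)]
  exact main_lemma s.length s le_rfl hg

theorem mem_items_ofList {κ ν : Type} [BEq κ] [LawfulBEq κ] (l : List (κ × ν)) (p : κ × ν)
    (h : p ∈ (PySem.Dict.ofList l).items) : p ∈ l := by
  rw [PySem.Dict.ofList, PySem.Dict.update] at h
  suffices H : ∀ (l : List (κ × ν)) (d : PySem.Dict κ ν) (p : κ × ν),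
      p ∈ (List.foldl (fun acc q => acc.insert q.1 q.2) d l).items → p ∈ d.items ∨ p ∈ l by
    rcases H l PySem.Dict.empty p h with h' | h'
    · simp [PySem.Dict.empty] at h'
    · exact h'
  intro l
  induction l with
  | nil => intro d p hp; exact Or.inl hp
  | cons q rest ih =>
    intro d p hp
    rcases ih _ _ hp with h' | h'
    · rcases (PySem.Dict.mem_items_insert d q.1 q.2 p).mp h' with h'' | h''
      · exact Or.inr (by simp [h''])
      · exact Or.inl h''.1
    · exact Or.inr (List.mem_cons.mpr (Or.inr h'))

-- A's per-value replacement chain, as one named function (proof-side abbreviation)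
def pvA (v : String) : String :=
  PySem.Str.replace (PySem.Str.replace (PySem.Str.replace
    (PySem.Str.replace v "$TargetDir$" "bin/$Configuration$/net5.0")
    "$TargetFwkDir$" "bin/$Configuration$/net5.0")
    "$TargetFwk472Dir$" "bin/$Configuration$/net5.0")
    "$TargetDir_x64$" "bin/x64/$Configuration$/net5.0"

-- ===== VERDICT (by name: the statement is the Claim_ definition above) =====
theorem expand_vars_spec : Claim_equal_expand_vars := by
  intro vars _ hpre
  show expand_vars vars =
    (PySem.Dict.ofList vars).items.map (fun p => (p.1, String.ofList (pySub p.2.toList)))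
  have hnodup : ((PySem.Dict.ofList vars).items.map (fun p => p.1)).Nodup :=
    PySem.Dict.nodup_keys_ofList vars
  have hfold := PySem.Dict.items_foldl_insert_fresh (PySem.Dict.ofList vars).items
      (fun p : String × String => p.1) (fun p : String × String => pvA p.2)
      PySem.Dict.empty (fun a _ => PySem.Dict.contains_empty a.1) hnodup
  have hA : expand_vars vars = (PySem.Dict.ofList vars).items.map (fun p => (p.1, pvA p.2)) := by
    have h0 : (PySem.Dict.empty : PySem.Dict String String).items = [] := rfl
    exact hfold.trans (by rw [h0]; simp)
  rw [hA]
  apply List.map_congr_left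
  intro p hp
  have hg : pvGood p.2.toList := fun f hf => hpre p (mem_items_ofList vars p hp) f hf
  have hv : (pvA p.2).toList = pySub p.2.toList := by
    unfold pvA
    simp only [PySem.Str.toList_replace]
    exact value_eq p.2.toList hg
  show (p.1, pvA p.2) = (p.1, String.ofList (pySub p.2.toList))
  rw [← hv, String.ofList_toList]
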